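-- pv_equiv track=rewrite | github.com/Firestar93/GAS_motifs | GainOfFunction/merge_and_filter_FIMO.py | expand_motif
-- ===== SOURCE A (Python) =====
-- from itertools import product
--
-- def expand_motif(motif, substitutions):
--     positions = []
--     options = []
--     for i, letter in enumerate(motif):
--         if letter in substitutions:
--             positions.append(i)
--             options.append(substitutions[letter])
--         else:
--             options.append(letter)
--
--     for p in product(*options):
--         yield ''.join(p)
-- ===== SOURCE B (Python) =====
-- def expand_motif(motif, substitutions):
--     options = []
--     for letter in motif:
--         if letter in substitutions:
--             options.append(substitutions[letter])
--         else:
--             options.append(letter)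
--
--     # build all expansions of each suffix, back to front
--     results = [""]
--     for opt in reversed(options):
--         results = [c + s for c in opt for s in results]
--     yield from results
-- ===== Notes on version B (the rewrite author's own statement) =====
-- stated objective: alternative
-- what changed: Replaces itertools.product (tuples joined per output, leftmost position varying slowest) with an explicit suffix-product list built back-to-front: iterate the options in reverse, prepending each candidate character to every already-built suffix expansion; the unused positions list is dropped.
import Mathlib
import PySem

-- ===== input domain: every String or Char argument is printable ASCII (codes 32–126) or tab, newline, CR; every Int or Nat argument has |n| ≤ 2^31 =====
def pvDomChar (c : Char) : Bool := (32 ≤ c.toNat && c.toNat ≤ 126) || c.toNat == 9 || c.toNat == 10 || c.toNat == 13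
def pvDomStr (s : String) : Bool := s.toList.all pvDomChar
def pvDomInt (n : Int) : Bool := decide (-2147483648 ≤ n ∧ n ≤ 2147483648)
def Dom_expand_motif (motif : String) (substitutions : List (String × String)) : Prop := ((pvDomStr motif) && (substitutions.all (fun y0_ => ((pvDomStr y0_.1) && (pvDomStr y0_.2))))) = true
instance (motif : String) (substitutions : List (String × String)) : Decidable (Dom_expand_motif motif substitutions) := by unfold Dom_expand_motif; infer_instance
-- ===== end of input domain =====

-- B replaces itertools.product with an explicit suffix-product list built back-to-front and drops the unused positions list (objective: alternative decomposition, not faster).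

-- ===== PORT A =====
-- state of A's first loop: (positions, options); positions is built but never used afterwards.
def expand_motif (motif : String) (substitutions : List (String × String)) : List String :=
  let d := PySem.Dict.mk substitutions
  let st := (PySem.List.enumerate motif.toList).foldl
    (fun (st : List Int × List String) p =>
      match PySem.Dict.get? d (String.mk [p.2]) with
      | some v => (st.1 ++ [p.1], st.2 ++ [v])          -- letter in substitutions
      | none   => (st.1, st.2 ++ [String.mk [p.2]]))    -- else: options.append(letter)
    ([], [])
  -- for p in product(*options): yield ''.join(p)  (joined prefixes accumulated directly)
  st.2.foldl (fun acc opt => acc.flatMap (fun pr => opt.toList.map (fun c => pr ++ String.mk [c]))) [""]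

-- ===== PORT B =====
def expand_motif_alt (motif : String) (substitutions : List (String × String)) : List String :=
  let d := PySem.Dict.mk substitutions
  let options := motif.toList.map (fun letter =>
    match PySem.Dict.get? d (String.mk [letter]) with
    | some v => v
    | none   => String.mk [letter])
  -- for opt in reversed(options): results = [c + s for c in opt for s in results]
  options.foldr (fun opt results => opt.toList.flatMap (fun c => results.map (fun s => String.mk [c] ++ s))) [""]

-- ===== PRECONDITION & SPEC =====
def Spec_expand_motif (motif : String) (substitutions : List (String × String)) (out : List String) : Prop := out = expand_motif_alt motif substitutions
instance (motif : String) (substitutions : List (String × String)) (out : List String) : Decidable (Spec_expand_motif motif substitutions out) := by unfold Spec_expand_motif; infer_instance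

-- ===== CLAIM (what is proved, stated in full; the proofs are below) =====
def Claim_equal_expand_motif : Prop := ∀ (motif : String) (substitutions : List (String × String)), Dom_expand_motif motif substitutions → Spec_expand_motif motif substitutions (expand_motif motif substitutions)

-- ===== LEMMAS AND PROOFS =====

-- the second component of A's first loop is just the mapped options
theorem fold_snd (d : PySem.Dict String String) (l : List (Int × Char)) :
    ∀ (ps : List Int) (os : List String),
    (l.foldl
      (fun (st : List Int × List String) p =>
        match PySem.Dict.get? d (String.mk [p.2]) with
        | some v => (st.1 ++ [p.1], st.2 ++ [v])
        | none   => (st.1, st.2 ++ [String.mk [p.2]])) (ps, os)).2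
    = os ++ l.map (fun p =>
        match PySem.Dict.get? d (String.mk [p.2]) with
        | some v => v
        | none   => String.mk [p.2]) := by
  induction l with
  | nil => simp
  | cons x xs ih =>
    intro ps os
    simp only [List.foldl_cons, List.map_cons]
    cases h : PySem.Dict.get? d (String.mk [x.2]) with
    | some v => simp [ih]
    | none => simp [ih]

-- mapping a function of the letter over enumerate is mapping it over the list
theorem map_snd_enum (substitutions : List (String × String)) : ∀ (l : List Char) (s : Int),
    (PySem.List.enumerate l s).map (fun p =>
      match PySem.Dict.get? (PySem.Dict.mk substitutions) (String.mk [p.2]) with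
      | some v => v
      | none   => String.mk [p.2])
    = l.map (fun letter =>
      match PySem.Dict.get? (PySem.Dict.mk substitutions) (String.mk [letter]) with
      | some v => v
      | none   => String.mk [letter]) := by
  intro l
  induction l with
  | nil => intro s; simp
  | cons x xs ih => intro s; simp [PySem.List.enumerate_cons, ih]

-- A's product fold from a list of prefixes equals prefixing onto B's suffix products
theorem fold_prod (options : List String) :
    ∀ (acc : List String),
    options.foldl (fun acc opt => acc.flatMap (fun pr => opt.toList.map (fun c => pr ++ String.mk [c]))) acc
    = acc.flatMap (fun pre =>
        (options.foldr (fun opt results => opt.toList.flatMap (fun c => results.map (fun s => String.mk [c] ++ s))) [""]).map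
          (fun s => pre ++ s)) := by
  induction options with
  | nil => intro acc; simp
  | cons o rest ih =>
    intro acc
    simp only [List.foldl_cons, ih, List.foldr_cons]
    simp [List.flatMap_assoc, List.map_eq_flatMap, List.map_map, Function.comp_def,
      String.append_assoc]

-- ===== VERDICT (by name: the statement is the Claim_ definition above) =====
theorem expand_motif_spec : Claim_equal_expand_motif := by
  intro motif substitutions _
  unfold Spec_expand_motif expand_motif expand_motif_alt
  simp only [fold_snd, List.nil_append, fold_prod]
  rw [map_snd_enum]
  simp
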